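-- pv_equiv track=rewrite | github.com/jedzej/tietopythontraining-basic | students/bec_lukasz/lesson_05_lists/commaCode.py | show_my_list
-- ===== SOURCE A (Python) =====
-- def show_my_list(spam):
--
--     my_string = ''
--
--     for i in range(len(spam)):
--         if i == len(spam)-2:
--             sep = ' and '
--             my_string += str(spam[i])
--             my_string += sep
--         elif i == len(spam)-1:
--             sep = ''
--             my_string += str(spam[i])
--             my_string += sep
--         else:
--             sep = ', '
--             my_string += str(spam[i])
--             my_string += sep
--
--     return my_string
-- ===== SOURCE B (Python) =====
-- def show_my_list(spam):
--     if not spam: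
--         return ''
--     if len(spam) == 1:
--         return str(spam[0])
--     return ', '.join(str(x) for x in spam[:-1]) + ' and ' + str(spam[-1])
-- ===== Notes on version B (the rewrite author's own statement) =====
-- stated objective: simpler
-- what changed: Replaced the per-index loop that branches on i vs len-2/len-1 at every step by explicit empty/singleton guards plus a head/last partition: ', '.join over spam[:-1] followed by ' and ' plus the last element (str.join avoids repeated string concatenation).
import Mathlib
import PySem

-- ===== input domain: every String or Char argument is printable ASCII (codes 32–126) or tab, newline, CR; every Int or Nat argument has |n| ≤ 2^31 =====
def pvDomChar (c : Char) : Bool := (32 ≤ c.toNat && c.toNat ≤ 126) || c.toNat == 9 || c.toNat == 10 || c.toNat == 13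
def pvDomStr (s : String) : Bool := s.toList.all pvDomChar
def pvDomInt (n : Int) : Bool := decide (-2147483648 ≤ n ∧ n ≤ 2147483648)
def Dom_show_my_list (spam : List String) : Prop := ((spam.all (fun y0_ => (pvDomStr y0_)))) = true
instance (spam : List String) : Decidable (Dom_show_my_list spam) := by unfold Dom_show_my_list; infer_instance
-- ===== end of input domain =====

-- B differs only in decomposition: it guards the empty and singleton lists and otherwise
-- joins the head part with ', ' and appends ' and ' plus the last element (simpler; same cost).

-- ===== PORT A =====
def show_my_list (spam : List String) : String :=
  (PySem.List.pyRange 0 (spam.length : Int) 1).foldl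
    (fun my_string i =>
      if i = (spam.length : Int) - 2 then
        (my_string ++ PySem.List.pyGetD spam i "") ++ " and "
      else if i = (spam.length : Int) - 1 then
        (my_string ++ PySem.List.pyGetD spam i "") ++ ""
      else
        (my_string ++ PySem.List.pyGetD spam i "") ++ ", ") ""

-- ===== PORT B =====
def show_my_list_alt (spam : List String) : String :=
  match spam with
  | [] => ""
  | [x] => x
  | x :: y :: rest =>
      -- spam[:-1] is dropLast, spam[-1] is getLast (the list is non-empty here)
      PySem.Str.join ", " ((x :: y :: rest).dropLast) ++ " and "
        ++ (x :: y :: rest).getLast (by simp)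

-- ===== PRECONDITION & SPEC =====
def Spec_show_my_list (spam : List String) (out : String) : Prop := out = show_my_list_alt spam
instance (spam : List String) (out : String) : Decidable (Spec_show_my_list spam out) := by unfold Spec_show_my_list; infer_instance

-- ===== CLAIM (what is proved, stated in full; the proofs are below) =====
def Claim_equal_show_my_list : Prop := ∀ (spam : List String), Dom_show_my_list spam → Spec_show_my_list spam (show_my_list spam)

-- ===== LEMMAS AND PROOFS =====

-- the common comma/'and' shape both programs compute
def pvHelper : List String → String
  | [] => ""
  | [x] => x
  | [x, y] => (x ++ " and ") ++ y
  | x :: y :: z :: rest => (x ++ ", ") ++ pvHelper (y :: z :: rest)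

-- A's loop body, over an enumerated element, with n = len(spam)
def pvBody (n : Int) (acc : String) (p : Int × String) : String :=
  if p.1 = n - 2 then (acc ++ p.2) ++ " and "
  else if p.1 = n - 1 then (acc ++ p.2) ++ ""
  else (acc ++ p.2) ++ ", "

lemma pvA_fold (l : List String) : ∀ (s : Int) (acc : String),
    (PySem.List.enumerate l s).foldl (pvBody (s + l.length)) acc = acc ++ pvHelper l := by
  induction l with
  | nil => intro s acc; simp [PySem.List.enumerate_nil, pvHelper]
  | cons x t ih =>
    intro s acc
    rw [PySem.List.enumerate_cons]
    match t with
    | [] =>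
      simp [PySem.List.enumerate_nil, pvBody, pvHelper, String.append_assoc]
      omega
    | [y] =>
      simp [PySem.List.enumerate_cons, PySem.List.enumerate_nil, pvBody, pvHelper,
        String.append_assoc]
      omega
    | y :: z :: r =>
      have hx : pvBody (s + (x :: y :: z :: r).length) acc (s, x) = (acc ++ x) ++ ", " := by
        simp only [pvBody]
        split_ifs with h1 h2
        · exfalso; simp only [List.length_cons] at h1; push_cast at h1; omega
        · exfalso; simp only [List.length_cons] at h2; push_cast at h2; omega
        · rfl
      rw [List.foldl_cons, hx]
      have hn : s + ((x :: y :: z :: r).length : Int) = (s + 1) + ((y :: z :: r).length : Int) := by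
        simp; omega
      rw [hn, ih (s + 1) ((acc ++ x) ++ ", ")]
      simp [pvHelper, String.append_assoc]

lemma pvA_eq (spam : List String) : show_my_list spam = pvHelper spam := by
  unfold show_my_list
  have h := PySem.List.enumerate_eq_map_pyRange (xs := spam) (d := "")
  have h2 : (PySem.List.enumerate spam 0).foldl (pvBody (spam.length : Int)) ""
      = (PySem.List.pyRange 0 (spam.length : Int) 1).foldl
          (fun acc j => pvBody (spam.length : Int) acc (j, PySem.List.pyGetD spam j "")) "" := by
    rw [h, List.foldl_map]
    simp
  have h3 := pvA_fold spam 0 ""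
  rw [show (0 : Int) + (spam.length : Int) = (spam.length : Int) by omega] at h3
  rw [h2] at h3
  simp [pvBody] at h3
  simpa using h3

lemma pvB_eq : ∀ (x y : String) (rest : List String),
    show_my_list_alt (x :: y :: rest) = pvHelper (x :: y :: rest) := by
  intro x y rest
  induction rest generalizing x y with
  | nil =>
    simp [show_my_list_alt, pvHelper, PySem.Str.join, String.append_assoc]
  | cons z r ih =>
    have hjoin : PySem.Str.join ", " ((x :: y :: z :: r).dropLast)
        = x ++ ", " ++ PySem.Str.join ", " ((y :: z :: r).dropLast) := by
      have : (x :: y :: z :: r).dropLast = x :: (y :: z :: r).dropLast := by simp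
      rw [this]
      match h : (y :: z :: r).dropLast with
      | [] => exfalso; have := congrArg List.length h; simp at this
      | b :: t =>
        simp only [PySem.Str.join, List.map_cons, PySem.Chars.join_cons_cons]
        simp [String.ofList_append, String.append_assoc]
        rw [show (',' :: ' ' :: PySem.Chars.join [',', ' '] (b.toList :: List.map String.toList t))
              = [',', ' '] ++ PySem.Chars.join [',', ' '] (b.toList :: List.map String.toList t) from rfl,
            String.ofList_append]
    have hlast : (x :: y :: z :: r).getLast (by simp) = (y :: z :: r).getLast (by simp) := by
      simp [List.getLast]
    show PySem.Str.join ", " ((x :: y :: z :: r).dropLast) ++ " and "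
        ++ (x :: y :: z :: r).getLast (by simp) = pvHelper (x :: y :: z :: r)
    rw [hjoin, hlast, pvHelper]
    rw [← ih y z]
    simp [show_my_list_alt, String.append_assoc]

-- ===== VERDICT (by name: the statement is the Claim_ definition above) =====
theorem show_my_list_spec : Claim_equal_show_my_list := by
  intro spam _
  unfold Spec_show_my_list
  rw [pvA_eq]
  match spam with
  | [] => simp [show_my_list_alt, pvHelper]
  | [x] => simp [show_my_list_alt, pvHelper]
  | x :: y :: rest => rw [pvB_eq]
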